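-- pv_equiv track=rewrite | github.com/ericsua/DataMiningProject23-24 | utils/clustering.py | find_closest_number_with_factors
-- ===== SOURCE A (Python) =====
-- def find_closest_number_with_factors(n):
--     n = n+15
--     factors_n = [i for i in range(1, n + 1) if n % i == 0]
--
--     closest_number = n
--     max_factors_count = len(factors_n)
--
--     for i in range(n - 1, n-30, -1):
--         factors_i = [j for j in range(1, i + 1) if i % j == 0]
--
--         if len(factors_i) > max_factors_count:
--             closest_number = i
--             max_factors_count = len(factors_i)
--
--     return closest_number
-- ===== SOURCE B (Python) =====
-- def find_closest_number_with_factors(n):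
--     # Count divisors of i in O(sqrt(i)) by pairing each divisor d <= sqrt(i)
--     # with its cofactor i // d, instead of scanning 1..i.
--     def num_divisors(i):
--         if i <= 0:
--             return 0
--         count = 0
--         d = 1
--         while d * d <= i:
--             if i % d == 0:
--                 count += 2 if d * d < i else 1
--             d += 1
--         return count
--
--     m = n + 15
--     best = m
--     best_count = num_divisors(m)
--     for i in range(m - 1, m - 30, -1):
--         c = num_divisors(i)
--         if c > best_count:
--             best = i
--             best_count = c
--     return best
-- ===== Notes on version B (the rewrite author's own statement) =====
-- stated objective: faster
-- what changed: Divisor counts are computed by the sqrt pairing trick (each divisor d with d*d<=i paired with i//d) instead of scanning every j in 1..i, so each of the 30 window numbers costs O(sqrt(i)) instead of O(i).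
import Mathlib
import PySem

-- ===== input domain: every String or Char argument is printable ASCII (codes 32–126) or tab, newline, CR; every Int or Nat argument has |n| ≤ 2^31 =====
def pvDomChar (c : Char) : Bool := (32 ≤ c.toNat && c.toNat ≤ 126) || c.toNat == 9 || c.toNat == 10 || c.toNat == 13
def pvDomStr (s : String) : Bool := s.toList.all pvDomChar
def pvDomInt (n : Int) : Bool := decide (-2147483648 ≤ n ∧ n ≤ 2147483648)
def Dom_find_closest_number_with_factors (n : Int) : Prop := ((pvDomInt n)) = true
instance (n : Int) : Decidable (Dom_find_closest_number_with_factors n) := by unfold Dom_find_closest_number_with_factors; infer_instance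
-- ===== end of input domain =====

-- B counts divisors of each window number by the sqrt-pairing trick (d and i//d for d*d ≤ i)
-- instead of A's full scan of 1..i: asymptotically faster, same return value for every int n.

-- ===== PORT A =====
-- [i for i in range(1, x + 1) if x % i == 0]   (the comprehension A writes twice)
def pvFactorsA (x : Int) : List Int :=
  (PySem.List.pyRange 1 (x + 1) 1).filter (fun j => PySem.Int.mod x j == 0)

-- the body of A's for-loop, as the fold step over the state (closest_number, max_factors_count)
def pvStepA (st : Int × Int) (i : Int) : Int × Int :=
  let factors_i := pvFactorsA i
  if (factors_i.length : Int) > st.2 then (i, (factors_i.length : Int)) else st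

def find_closest_number_with_factors (n : Int) : Int :=
  let m := n + 15
  let factors_n := pvFactorsA m
  let res := (PySem.List.pyRange (m - 1) (m - 30) (-1)).foldl pvStepA (m, (factors_n.length : Int))
  res.1

-- ===== PORT B =====
-- while d*d <= i: if i % d == 0: count += 2 if d*d < i else 1; d += 1
-- (loop over Nat: in Source B this loop only ever runs with i > 0 and d ≥ 1, where Python's
-- int arithmetic and Nat arithmetic coincide, so this is exact)
def pvNdivLoop (i : Nat) (d : Nat) (c : Nat) : Nat :=
  if _h : d * d ≤ i then
    pvNdivLoop i (d + 1) (if i % d == 0 then (if d * d < i then c + 2 else c + 1) else c)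
  else c
termination_by i + 2 - d
decreasing_by
  have : d = 0 ∨ 1 ≤ d := by omega
  rcases this with h0 | h1
  · omega
  · have hd : d ≤ d * d := Nat.le_mul_of_pos_left d h1
    omega

-- def num_divisors(i): if i <= 0: return 0; … sqrt loop
def pvNumDivisors (i : Int) : Int :=
  if i ≤ 0 then 0 else (pvNdivLoop i.toNat 1 0 : Int)

-- the body of B's for-loop, as the fold step over the state (best, best_count)
def pvStepB (st : Int × Int) (i : Int) : Int × Int :=
  let c := pvNumDivisors i
  if c > st.2 then (i, c) else st

def find_closest_number_with_factors_alt (n : Int) : Int :=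
  let m := n + 15
  let res := (PySem.List.pyRange (m - 1) (m - 30) (-1)).foldl pvStepB (m, pvNumDivisors m)
  res.1

-- ===== PRECONDITION & SPEC =====
def Spec_find_closest_number_with_factors (n : Int) (out : Int) : Prop := out = find_closest_number_with_factors_alt n
instance (n : Int) (out : Int) : Decidable (Spec_find_closest_number_with_factors n out) := by unfold Spec_find_closest_number_with_factors; infer_instance

-- ===== CLAIM (what is proved, stated in full; the proofs are below) =====
def Claim_equal_find_closest_number_with_factors : Prop := ∀ (n : Int), Dom_find_closest_number_with_factors n → Spec_find_closest_number_with_factors n (find_closest_number_with_factors n)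

-- ===== LEMMAS AND PROOFS =====

-- A's scan over [1..b] counts exactly the members of Ico 1 (b+1) dividing x (as Nats)
lemma pvScan_card (x b : Nat) :
    ((PySem.List.pyRange 1 ((b : Int) + 1) 1).filter
      (fun j => PySem.Int.mod (x : Int) j == 0)).length
      = ((Finset.Ico 1 (b + 1)).filter (fun j => x % j = 0)).card := by
  induction b with
  | zero => simp [PySem.List.pyRange_one_eq_nil]
  | succ b ih =>
    have hc : (((b + 1 : Nat) : Int) + 1) = ((b : Int) + 1) + 1 := by push_cast; ring
    have hR : ((Finset.Ico 1 (b + 1 + 1)).filter (fun j => x % j = 0)).card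
        = ((Finset.Ico 1 (b + 1)).filter (fun j => x % j = 0)).card
          + (if x % (b + 1) = 0 then 1 else 0) := by
      rw [Nat.Ico_succ_right_eq_insert_Ico (by omega), Finset.filter_insert]
      by_cases hmod : x % (b + 1) = 0
      · rw [if_pos hmod, if_pos hmod,
          Finset.card_insert_of_notMem (by simp [Finset.mem_Ico])]
      · rw [if_neg hmod, if_neg hmod]; omega
    have hsing : (List.filter (fun j => PySem.Int.mod (x : Int) j == 0) [((b : Int) + 1)]).length
        = (if x % (b + 1) = 0 then 1 else 0) := by
      have hb : ((b : Int) + 1) = ((b + 1 : Nat) : Int) := by push_cast; ring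
      rw [hb]
      simp only [List.filter_cons, List.filter_nil, PySem.Int.mod_natCast]
      by_cases hmod : x % (b + 1) = 0
      · simp [hmod]
      · simp only [hmod, if_false]
        have hcond : ¬ ((((x % (b + 1) : Nat)) : Int) == 0) = true := by
          intro h
          exact hmod (by exact_mod_cast (beq_iff_eq.mp h))
        rw [if_neg hcond]
        simp
    rw [hc, PySem.List.pyRange_one_succ_right (by omega), List.filter_append,
      List.length_append, ih, hR, hsing]

-- the Ico-filter at b = x is exactly x.divisors (for 0 < x)
lemma pvScan_divisors (x : Nat) (hx : 0 < x) :
    (Finset.Ico 1 (x + 1)).filter (fun j => x % j = 0) = x.divisors := by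
  ext e
  simp only [Finset.mem_filter, Finset.mem_Ico, Nat.mem_divisors]
  constructor
  · rintro ⟨⟨h1, _⟩, hmod⟩
    exact ⟨Nat.dvd_of_mod_eq_zero hmod, by omega⟩
  · rintro ⟨hdvd, _⟩
    have he : 0 < e := Nat.pos_of_dvd_of_pos hdvd hx
    exact ⟨⟨he, by have := Nat.le_of_dvd hx hdvd; omega⟩, Nat.mod_eq_zero_of_dvd hdvd⟩

-- work remaining for the sqrt loop from counter value d
def pvRem (i d : Nat) : Nat :=
  ((i.divisors.filter (fun e => d ≤ e ∧ e * e ≤ i)).card)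
  + ((i.divisors.filter (fun e => i < e * e ∧ e * d ≤ i)).card)

lemma pvFilter_card_split {s : Finset ℕ} {P Q : ℕ → Prop} [DecidablePred P] [DecidablePred Q]
    {x : ℕ} (hx : x ∈ s) (hPx : P x) (hQx : ¬ Q x)
    (h : ∀ e ∈ s, e ≠ x → (P e ↔ Q e)) :
    (s.filter P).card = (s.filter Q).card + 1 := by
  have hset : s.filter P = insert x (s.filter Q) := by
    ext e
    simp only [Finset.mem_filter, Finset.mem_insert]
    constructor
    · rintro ⟨hes, hPe⟩
      by_cases hex : e = x
      · exact Or.inl hex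
      · exact Or.inr ⟨hes, (h e hes hex).mp hPe⟩
    · rintro (rfl | ⟨hes, hQe⟩)
      · exact ⟨hx, hPx⟩
      · have hex : e ≠ x := by rintro rfl; exact hQx hQe
        exact ⟨hes, (h e hes hex).mpr hQe⟩
  rw [hset, Finset.card_insert_of_notMem (by simp [Finset.mem_filter, hQx])]

-- the only divisor leaving the cofactor set between counter d and d+1 is i / d
lemma pvCof (i d e : Nat) (hi : 0 < i) (hd : 1 ≤ d) (he : e ∣ i)
    (h1 : i < e * e) (h2 : e * d ≤ i) (h3 : ¬ e * (d + 1) ≤ i) :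
    d ∣ i ∧ e = i / d ∧ d * d < i := by
  have hepos : 0 < e := Nat.pos_of_dvd_of_pos he hi
  obtain ⟨g, hg⟩ := he
  have hdg : d ≤ g := Nat.le_of_mul_le_mul_left (by omega) hepos
  have hgd : g < d + 1 := Nat.lt_of_mul_lt_mul_left (a := e) (by omega)
  have hge : g = d := by omega
  have hi' : i = e * d := by rw [hg, hge]
  have hddvd : d ∣ i := ⟨e, by rw [hi', Nat.mul_comm]⟩
  have hed : e = i / d := by
    rw [hi', Nat.mul_div_cancel _ (by omega)]
  have hde : d < e := Nat.lt_of_mul_lt_mul_left (a := e) (by rw [← hi']; exact h1)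
  refine ⟨hddvd, hed, ?_⟩
  have : d * d < e * d := (Nat.mul_lt_mul_right (by omega : 0 < d)).mpr hde
  omega

lemma pvRem_step (i d : Nat) (hi : 0 < i) (hd : 1 ≤ d) (hdd : d * d ≤ i) :
    pvRem i d = (if i % d == 0 then (if d * d < i then 2 else 1) else 0) + pvRem i (d + 1) := by
  unfold pvRem
  have hcongr2same : (¬ (d ∣ i ∧ d * d < i)) →
      i.divisors.filter (fun e => i < e * e ∧ e * d ≤ i)
        = i.divisors.filter (fun e => i < e * e ∧ e * (d + 1) ≤ i) := by
    intro hno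
    refine Finset.filter_congr (fun e he => ?_)
    have hedvd : e ∣ i := (Nat.mem_divisors.mp he).1
    constructor
    · rintro ⟨ha, hb⟩
      refine ⟨ha, ?_⟩
      by_contra h3
      obtain ⟨hdd', _, hlt'⟩ := pvCof i d e hi hd hedvd ha hb h3
      exact hno ⟨hdd', hlt'⟩
    · rintro ⟨ha, hb⟩
      have : e * d ≤ e * (d + 1) := Nat.mul_le_mul_left e (by omega)
      exact ⟨ha, by omega⟩
  by_cases hdvd : d ∣ i
  · have hmem : d ∈ i.divisors := Nat.mem_divisors.mpr ⟨hdvd, by omega⟩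
    have hcard1 : (i.divisors.filter (fun e => d ≤ e ∧ e * e ≤ i)).card
        = (i.divisors.filter (fun e => d + 1 ≤ e ∧ e * e ≤ i)).card + 1 := by
      refine pvFilter_card_split hmem ⟨le_refl d, hdd⟩ (by omega) (fun e he hne => ?_)
      constructor
      · rintro ⟨h1, h2⟩; exact ⟨by omega, h2⟩
      · rintro ⟨h1, h2⟩; exact ⟨by omega, h2⟩
    have hm0 : i % d = 0 := Nat.mod_eq_zero_of_dvd hdvd
    by_cases hlt : d * d < i
    · have hfd : i / d * d = i := Nat.div_mul_cancel hdvd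
      have hdf : d < i / d := Nat.lt_of_mul_lt_mul_right (a := d) (by omega)
      have hfmem : i / d ∈ i.divisors :=
        Nat.mem_divisors.mpr ⟨Nat.div_dvd_of_dvd hdvd, by omega⟩
      have hfpos : 0 < i / d := by omega
      have hPf : i < i / d * (i / d) ∧ i / d * d ≤ i := by
        constructor
        · calc i = i / d * d := hfd.symm
            _ < i / d * (i / d) := Nat.mul_lt_mul_of_le_of_lt (le_refl _) hdf hfpos
        · omega
      have hQf : ¬ (i < i / d * (i / d) ∧ i / d * (d + 1) ≤ i) := by
        rintro ⟨_, hq⟩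
        have : i / d * (d + 1) = i / d * d + i / d := by ring
        omega
      have hcard2 : (i.divisors.filter (fun e => i < e * e ∧ e * d ≤ i)).card
          = (i.divisors.filter (fun e => i < e * e ∧ e * (d + 1) ≤ i)).card + 1 := by
        refine pvFilter_card_split hfmem hPf hQf (fun e he hne => ?_)
        have hedvd : e ∣ i := (Nat.mem_divisors.mp he).1
        constructor
        · rintro ⟨ha, hb⟩
          refine ⟨ha, ?_⟩
          by_contra h3
          obtain ⟨_, heq, _⟩ := pvCof i d e hi hd hedvd ha hb h3
          exact hne heq
        · rintro ⟨ha, hb⟩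
          have : e * d ≤ e * (d + 1) := Nat.mul_le_mul_left e (by omega)
          exact ⟨ha, by omega⟩
      simp only [hm0, beq_self_eq_true, if_true, if_pos hlt]
      omega
    · have hcard2 := hcongr2same (by tauto)
      simp only [hm0, beq_self_eq_true, if_true, if_neg hlt, hcard2]
      omega
  · have hcard1 : i.divisors.filter (fun e => d ≤ e ∧ e * e ≤ i)
        = i.divisors.filter (fun e => d + 1 ≤ e ∧ e * e ≤ i) := by
      refine Finset.filter_congr (fun e he => ?_)
      have hne : e ≠ d := by
        rintro rfl; exact hdvd (Nat.mem_divisors.mp he).1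
      constructor
      · rintro ⟨h1, h2⟩; exact ⟨by omega, h2⟩
      · rintro ⟨h1, h2⟩; exact ⟨by omega, h2⟩
    have hcard2 := hcongr2same (by tauto)
    have hm : ¬ (i % d = 0) := fun h => hdvd (Nat.dvd_of_mod_eq_zero h)
    simp only [hcard1, hcard2, beq_iff_eq, if_neg hm]
    omega

lemma pvRem_zero (i d : Nat) (_hi : 0 < i) (hdd : i < d * d) : pvRem i d = 0 := by
  unfold pvRem
  have h1 : i.divisors.filter (fun e => d ≤ e ∧ e * e ≤ i) = ∅ := by
    rw [Finset.filter_eq_empty_iff]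
    rintro e he ⟨hde, hee⟩
    have : d * d ≤ e * e := Nat.mul_le_mul hde hde
    omega
  have h2 : i.divisors.filter (fun e => i < e * e ∧ e * d ≤ i) = ∅ := by
    rw [Finset.filter_eq_empty_iff]
    rintro e he ⟨hee, hed⟩
    have he0 : 0 < e := Nat.pos_of_mem_divisors he
    have h3 : d < e := Nat.lt_of_mul_lt_mul_left (a := e) (by omega)
    have h4 : e < d := Nat.lt_of_mul_lt_mul_right (a := d) (by omega)
    omega
  rw [h1, h2]
  simp

lemma pvRem_one (i : Nat) (hi : 0 < i) : pvRem i 1 = i.divisors.card := by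
  unfold pvRem
  have h1 : i.divisors.filter (fun e => 1 ≤ e ∧ e * e ≤ i)
      = i.divisors.filter (fun e => e * e ≤ i) := by
    refine Finset.filter_congr (fun e he => ?_)
    have := Nat.pos_of_mem_divisors he
    constructor
    · rintro ⟨_, h⟩; exact h
    · intro h; exact ⟨by omega, h⟩
  have h2 : i.divisors.filter (fun e => i < e * e ∧ e * 1 ≤ i)
      = i.divisors.filter (fun e => ¬ e * e ≤ i) := by
    refine Finset.filter_congr (fun e he => ?_)
    have hle : e ≤ i := Nat.le_of_dvd hi (Nat.mem_divisors.mp he).1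
    constructor
    · rintro ⟨h, _⟩; omega
    · intro h; exact ⟨by omega, by omega⟩
  rw [h1, h2]
  exact Finset.card_filter_add_card_filter_not (fun e => e * e ≤ i)

lemma pvNdivLoop_inv (i : Nat) (hi : 0 < i) :
    ∀ k d c, i + 2 - d ≤ k → 1 ≤ d → pvNdivLoop i d c = c + pvRem i d := by
  intro k
  induction k with
  | zero =>
    intro d c hk hd
    have hdd : ¬ d * d ≤ i := by
      have : d ≤ d * d := Nat.le_mul_of_pos_left d (by omega)
      omega
    rw [pvNdivLoop, dif_neg hdd, pvRem_zero i d hi (by omega)]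
    omega
  | succ k ih =>
    intro d c hk hd
    rw [pvNdivLoop]
    by_cases hdd : d * d ≤ i
    · rw [dif_pos hdd, ih (d + 1) _ (by omega) (by omega),
        pvRem_step i d hi hd hdd]
      by_cases hm : i % d = 0 <;> by_cases hlt : d * d < i <;> simp [hm, hlt] <;> omega
    · simp only [hdd, dite_false]
      rw [pvRem_zero i d hi (by omega)]
      omega

lemma pvNumDivisors_card (x : Nat) (hx : 0 < x) :
    pvNumDivisors (x : Int) = (x.divisors.card : Int) := by
  have h1 : pvNdivLoop x 1 0 = 0 + pvRem x 1 :=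
    pvNdivLoop_inv x hx (x + 2) 1 0 (by omega) (by omega)
  have hx0 : ¬ ((x : Int) ≤ 0) := by exact_mod_cast Nat.not_le.mpr hx
  rw [pvNumDivisors, if_neg hx0]
  simp [h1, pvRem_one x hx]

-- the two divisor counters agree on every Int
lemma pvLenA (x : Int) : ((pvFactorsA x).length : Int) = pvNumDivisors x := by
  by_cases hx : x ≤ 0
  · have h1 : x + 1 ≤ 1 := by omega
    simp [pvFactorsA, pvNumDivisors, hx, PySem.List.pyRange_one_eq_nil h1]
  · have hx' : 0 < x := by omega
    obtain ⟨k, rfl⟩ : ∃ k : Nat, x = (k : Int) := ⟨x.toNat, by omega⟩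
    have hk : 0 < k := by exact_mod_cast hx'
    rw [pvNumDivisors_card k hk]
    unfold pvFactorsA
    rw [pvScan_card k k, pvScan_divisors k hk]

lemma pvStep_eq : pvStepA = pvStepB := by
  funext st i
  simp [pvStepA, pvStepB, pvLenA]

-- ===== VERDICT (by name: the statement is the Claim_ definition above) =====
theorem find_closest_number_with_factors_spec : Claim_equal_find_closest_number_with_factors := by
  intro n _
  simp only [Spec_find_closest_number_with_factors, find_closest_number_with_factors,
    find_closest_number_with_factors_alt, pvStep_eq, pvLenA]
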